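-- pv_equiv track=rewrite | github.com/FineArtMaths/ScaleAnalyzer | scales.py | equalByTransposition
-- ===== SOURCE A (Python) =====
-- EDO = 12
--
-- def add(pc, interval):
--   return (pc + interval) % EDO
--
-- def equalByTransposition(scale1, scale2):
--   if len(scale1) != len(scale2):
--     return False
--   for i in range(EDO):
--     x = [add(s, i) for s in scale1]
--     if x == scale2:
--       return True
--   return False
-- ===== SOURCE B (Python) =====
-- EDO = 12
--
-- def equalByTransposition(scale1, scale2):
--     if len(scale1) != len(scale2):
--         return False
--     if not scale1:
--         return True
--     i = (scale2[0] - scale1[0]) % EDO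
--     return all((s + i) % EDO == t for s, t in zip(scale1, scale2))
-- ===== Notes on version B (the rewrite author's own statement) =====
-- stated objective: faster
-- what changed: Instead of trying all 12 transposition intervals and building a full transposed list for each, B derives the single possible interval from the first elements and verifies it in one short-circuiting pass over the zipped scales.
import Mathlib
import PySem

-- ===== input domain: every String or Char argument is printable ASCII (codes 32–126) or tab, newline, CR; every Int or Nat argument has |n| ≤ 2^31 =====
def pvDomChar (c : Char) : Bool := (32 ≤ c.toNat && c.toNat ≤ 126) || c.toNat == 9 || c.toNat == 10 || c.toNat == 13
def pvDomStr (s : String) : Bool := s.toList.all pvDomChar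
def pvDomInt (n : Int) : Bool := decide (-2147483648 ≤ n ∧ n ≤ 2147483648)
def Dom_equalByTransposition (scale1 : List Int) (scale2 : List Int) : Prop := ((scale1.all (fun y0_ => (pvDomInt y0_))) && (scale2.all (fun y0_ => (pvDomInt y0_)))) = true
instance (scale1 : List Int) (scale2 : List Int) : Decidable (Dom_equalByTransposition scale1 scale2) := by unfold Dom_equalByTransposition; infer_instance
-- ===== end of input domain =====

-- B derives the unique candidate interval from the first elements and verifies it in one pass,
-- instead of trying all 12 intervals; same return value on every input.
-- ===== PORT A =====
def pvAdd (pc : Int) (interval : Int) : Int := PySem.Int.mod (pc + interval) 12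

def equalByTransposition (scale1 : List Int) (scale2 : List Int) : Bool :=
  if scale1.length ≠ scale2.length then false
  else (PySem.List.pyRange 0 12 1).any (fun i => (scale1.map (fun s => pvAdd s i)) == scale2)

-- ===== PORT B =====
def equalByTransposition_alt (scale1 : List Int) (scale2 : List Int) : Bool :=
  if scale1.length ≠ scale2.length then false
  else
    match scale1, scale2 with
    | s :: _, t :: _ =>
      let i := PySem.Int.mod (t - s) 12
      (scale1.zip scale2).all (fun p => PySem.Int.mod (p.1 + i) 12 == p.2)
    | _, _ => true

-- ===== PRECONDITION & SPEC =====
def Spec_equalByTransposition (scale1 : List Int) (scale2 : List Int) (out : Bool) : Prop := out = equalByTransposition_alt scale1 scale2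
instance (scale1 : List Int) (scale2 : List Int) (out : Bool) : Decidable (Spec_equalByTransposition scale1 scale2 out) := by unfold Spec_equalByTransposition; infer_instance

-- ===== CLAIM (what is proved, stated in full; the proofs are below) =====
def Claim_equal_equalByTransposition : Prop := ∀ (scale1 : List Int) (scale2 : List Int), Dom_equalByTransposition scale1 scale2 → Spec_equalByTransposition scale1 scale2 (equalByTransposition scale1 scale2)

-- ===== LEMMAS AND PROOFS =====

-- ===== VERDICT (by name: the statement is the Claim_ definition above) =====
theorem pymod12 (a : Int) : PySem.Int.mod a 12 = a % 12 := by
  simp [PySem.Int.mod, Int.fmod_eq_emod]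

theorem map_beq_eq_zip_all (f : Int → Int) :
    ∀ (l1 l2 : List Int), l1.length = l2.length →
      ((l1.map f) == l2) = (l1.zip l2).all (fun p => f p.1 == p.2) := by
  intro l1
  induction l1 with
  | nil => intro l2 h; cases l2 <;> simp_all
  | cons a l ih =>
    intro l2 h
    cases l2 with
    | nil => simp at h
    | cons b l2' =>
      simp only [List.map, List.zip, List.zipWith, List.all_cons, List.cons_beq_cons]
      rw [ih l2' (by simpa using h)]; rfl

theorem equalByTransposition_spec : Claim_equal_equalByTransposition := by
  intro scale1 scale2 _
  unfold Spec_equalByTransposition equalByTransposition equalByTransposition_alt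
  by_cases hlen : scale1.length = scale2.length
  · simp only [hlen, ne_eq, not_true_eq_false, if_false]
    cases scale1 with
    | nil =>
      cases scale2 with
      | nil => decide
      | cons b l2 => simp at hlen
    | cons s ss =>
      cases scale2 with
      | nil => simp at hlen
      | cons t ts =>
        simp only []
        rw [← map_beq_eq_zip_all (fun x => PySem.Int.mod (x + PySem.Int.mod (t - s) 12) 12)
              (s :: ss) (t :: ts) hlen]
        -- A's any over 0..11 equals the single candidate check
        rcases hb : ((s :: ss).map (fun x => PySem.Int.mod (x + PySem.Int.mod (t - s) 12) 12) == t :: ts) with _ | _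
        · -- candidate fails; show no i in range works
          rw [List.any_eq_false]
          intro i hi
          rw [PySem.List.mem_pyRange_one] at hi
          simp only [Bool.not_eq_true]
          rcases ha : ((s :: ss).map (fun x => pvAdd x i) == t :: ts) with _ | _
          · rfl
          · exfalso
            -- head equality forces i = (t - s) % 12
            rw [beq_iff_eq] at ha
            rw [beq_eq_false_iff_ne] at hb
            apply hb
            have hhead : pvAdd s i = t := by
              have := congrArg (fun l => l.headD 0) ha
              simpa using this
            have hi' : i = PySem.Int.mod (t - s) 12 := by
              rw [pymod12]
              unfold pvAdd at hhead
              rw [pymod12] at hhead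
              omega
            rw [← ha]
            apply List.map_congr_left
            intro x _
            rw [hi']
            rfl
        · -- candidate succeeds; it lies in range(12)
          rw [beq_iff_eq] at hb
          rw [List.any_eq_true]
          refine ⟨PySem.Int.mod (t - s) 12, ?_, ?_⟩
          · rw [PySem.List.mem_pyRange_one, pymod12]
            omega
          · rw [beq_iff_eq]
            exact hb
  · simp [hlen]
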